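-- pv_equiv track=rewrite | github.com/DarkOnGithub/Advent-of-code | 2024/19/day19.py | process_documents
-- ===== SOURCE A (Python) =====
-- from typing import List, Dict, Set, Tuple
--
-- def count_matches(document: str, patterns: List[str], memo: Dict[str, int] = None) -> int:
--     if memo is None:
--         memo = {}
--
--     if document in memo:
--         return memo[document]
--
--     if not document:
--         return 1
--
--     matches = 0
--     for pattern in patterns:
--         if document.startswith(pattern):
--             remaining = document[len(pattern):]
--             matches += count_matches(remaining, patterns, memo)
--
--     memo[document] = matches
--     return matches
--
-- def process_documents(patterns: List[str], documents: List[str]) -> Tuple[int, int]: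
--     valid_docs = 0
--     total_matches = 0
--
--     for doc in documents:
--         matches = count_matches(doc, patterns)
--         valid_docs += bool(matches)
--         total_matches += matches
--
--     return valid_docs, total_matches
-- ===== SOURCE B (Python) =====
-- def process_documents(patterns, documents):
--     valid_docs = 0
--     total_matches = 0
--     for doc in documents:
--         n = len(doc)
--         ws = [1]  # ws[k] = number of tilings of doc[i+1+k:]
--         for i in range(n - 1, -1, -1):
--             head = 0
--             for p in patterns:
--                 if p and doc[i:i + len(p)] == p:
--                     head += ws[len(p) - 1]
--             ws = [head] + ws
--         w = ws[0]
--         if w: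
--             valid_docs += 1
--         total_matches += w
--     return valid_docs, total_matches
-- ===== Notes on version B (the rewrite author's own statement) =====
-- stated objective: alternative
-- what changed: Replaces the top-down memoized recursion over suffix strings (dict keyed by suffix) with an iterative bottom-up DP that builds, back to front, a list of tiling counts per suffix position.
-- crash fix: When the empty string is among the patterns and some document is nonempty, A recurses forever (RecursionError); B skips the useless empty pattern and returns the tiling counts over the nonempty patterns. — e.g. on process_documents([""], ["a"]): A raises RecursionError, B returns (0, 0)
import Mathlib
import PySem

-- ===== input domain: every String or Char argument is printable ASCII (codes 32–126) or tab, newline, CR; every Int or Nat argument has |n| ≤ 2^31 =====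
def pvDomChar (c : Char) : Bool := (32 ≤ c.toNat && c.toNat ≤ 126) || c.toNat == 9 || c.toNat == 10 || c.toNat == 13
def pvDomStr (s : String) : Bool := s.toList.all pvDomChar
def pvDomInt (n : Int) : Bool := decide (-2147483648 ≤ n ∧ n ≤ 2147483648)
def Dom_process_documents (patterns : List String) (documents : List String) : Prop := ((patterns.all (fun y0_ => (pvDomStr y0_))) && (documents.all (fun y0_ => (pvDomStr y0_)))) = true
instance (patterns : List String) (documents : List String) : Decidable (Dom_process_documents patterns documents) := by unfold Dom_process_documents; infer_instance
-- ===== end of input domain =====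

-- B replaces A's top-down memoized recursion over suffix strings by a bottom-up DP list of
-- per-suffix tiling counts (objective: alternative); equivalence is about return values only.

-- ===== PORT A =====
-- count_matches, with a fuel guard (fuel := len(document)+1 suffices on Pre_; outside Pre_
-- the Python recurses forever, fuel 0 returns a junk value there) and the memo dict threaded.
def countMatchesA (patterns : List String) : Nat → String → PySem.Dict String Int → Int × PySem.Dict String Int
  | 0, _, memo => (0, memo)
  | fuel + 1, document, memo =>
    match memo.get? document with
    | some v => (v, memo)
    | none =>
      if document = "" then (1, memo)
      else
        let r := patterns.foldl
          (fun (st : Int × PySem.Dict String Int) pattern =>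
            if PySem.Str.startswith document pattern then
              let remaining := PySem.Str.slice document (some (PySem.Str.len pattern)) none
              let res := countMatchesA patterns fuel remaining st.2
              (st.1 + res.1, res.2)
            else st) (0, memo)
        (r.1, r.2.insert document r.1)

def process_documents (patterns : List String) (documents : List String) : Int × Int :=
  documents.foldl
    (fun st doc =>
      let mtc := (countMatchesA patterns (doc.toList.length + 1) doc PySem.Dict.empty).1
      (st.1 + (if mtc ≠ 0 then (1 : Int) else 0), st.2 + mtc))
    ((0 : Int), (0 : Int))

-- ===== PORT B =====
-- the inner DP loop of Source B for one document: ws[k] = tilings of doc[i+1+k:]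
def altDoc (patterns : List String) (doc : String) : Int :=
  let n := doc.toList.length
  let ws := (PySem.List.pyRange ((n : Int) - 1) (-1) (-1)).foldl
    (fun ws i =>
      (patterns.foldl
        (fun head p =>
          if p ≠ "" ∧ PySem.Str.slice doc (some i) (some (i + PySem.Str.len p)) = p
          then head + PySem.List.pyGetD ws (PySem.Str.len p - 1) 0
          else head) (0 : Int)) :: ws)
    [(1 : Int)]
  PySem.List.pyGetD ws 0 0

def process_documents_alt (patterns : List String) (documents : List String) : Int × Int :=
  documents.foldl
    (fun st doc =>
      let w := altDoc patterns doc
      (st.1 + (if w ≠ 0 then (1 : Int) else 0), st.2 + w))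
    ((0 : Int), (0 : Int))

-- ===== PRECONDITION & SPEC =====
-- Pre_ excludes exactly the inputs where A's recursion never terminates (RecursionError):
-- an empty string among the patterns together with some nonempty document.
def Pre_process_documents (patterns : List String) (documents : List String) : Prop :=
  "" ∉ patterns ∨ ∀ d ∈ documents, d = ""
instance (patterns : List String) (documents : List String) : Decidable (Pre_process_documents patterns documents) := by unfold Pre_process_documents; infer_instance

def pvWitness_process_documents : List String × List String := (["a", "bc"], ["abca", ""])

-- When "" is among the patterns and some document is nonempty, A raises RecursionError;
-- B skips the useless empty pattern and returns the count over the nonempty patterns.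
def Raises_process_documents (patterns : List String) (documents : List String) : Prop :=
  "" ∈ patterns ∧ ∃ d ∈ documents, d ≠ ""
instance (patterns : List String) (documents : List String) : Decidable (Raises_process_documents patterns documents) := by unfold Raises_process_documents; infer_instance
def pvRaiseWitness_process_documents : List String × List String := ([""], ["a"])
def pvRaiseWitnessOut_process_documents : Int × Int := (0, 0)

def Spec_process_documents (patterns : List String) (documents : List String) (out : Int × Int) : Prop := out = process_documents_alt patterns documents
instance (patterns : List String) (documents : List String) (out : Int × Int) : Decidable (Spec_process_documents patterns documents out) := by unfold Spec_process_documents; infer_instance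

-- ===== CLAIM (what is proved, stated in full; the proofs are below) =====
def Claim_equal_process_documents : Prop := ∀ (patterns : List String) (documents : List String), Dom_process_documents patterns documents → Pre_process_documents patterns documents → Spec_process_documents patterns documents (process_documents patterns documents)
def Claim_raises_process_documents : Prop := (∀ (patterns : List String) (documents : List String), Dom_process_documents patterns documents → Raises_process_documents patterns documents → ¬ Pre_process_documents patterns documents) ∧ (Dom_process_documents (pvRaiseWitness_process_documents.1) (pvRaiseWitness_process_documents.2) ∧ Raises_process_documents (pvRaiseWitness_process_documents.1) (pvRaiseWitness_process_documents.2) ∧ process_documents_alt (pvRaiseWitness_process_documents.1) (pvRaiseWitness_process_documents.2) = pvRaiseWitnessOut_process_documents)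

-- ===== LEMMAS AND PROOFS =====

-- the mathematical value both programs compute: tilings of s by nonempty patterns
-- (fueled so it is total; stable in the fuel once fuel > length)
def waysF (patterns : List String) : Nat → List Char → Int
  | 0, _ => 0
  | f + 1, s =>
    if s = [] then 1
    else (patterns.map (fun p =>
      if p.toList ≠ [] ∧ p.toList <+: s then waysF patterns f (s.drop p.toList.length) else 0)).sum

def ways (patterns : List String) (s : List Char) : Int := waysF patterns (s.length + 1) s

def GoodMemo (patterns : List String) (m : PySem.Dict String Int) : Prop :=
  ∀ k v, m.get? k = some v → v = ways patterns k.toList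

lemma toList_ne_nil {s : String} (h : s ≠ "") : s.toList ≠ [] := by
  intro he; exact h (String.toList_inj.mp (by rw [he]; rfl))

lemma waysF_stable (patterns : List String) :
    ∀ f g s, s.length < f → s.length < g → waysF patterns f s = waysF patterns g s := by
  intro f
  induction f with
  | zero => intro g s h; omega
  | succ f ih =>
    intro g s hf hg
    match g, hg with
    | g + 1, hg =>
      simp only [waysF]
      by_cases hs : s = []
      · simp [hs]
      · simp only [if_neg hs]
        congr 1
        apply List.map_congr_left
        intro p _
        by_cases hc : p.toList ≠ [] ∧ p.toList <+: s
        · simp only [if_pos hc]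
          have hlen : p.toList.length ≥ 1 := by
            cases hcl : p.toList with
            | nil => exact absurd hcl hc.1
            | cons a t => simp
          have hs1 : s.length ≥ 1 := by
            cases s with
            | nil => exact absurd rfl hs
            | cons a t => simp
          have hd : (s.drop p.toList.length).length = s.length - p.toList.length := by simp
          exact ih g (s.drop p.toList.length) (by omega) (by omega)
        · rw [if_neg hc, if_neg hc]

lemma ways_eq_sum (patterns : List String) (s : List Char) (hs : s ≠ []) :
    ways patterns s = (patterns.map (fun p =>
      if p.toList ≠ [] ∧ p.toList <+: s then ways patterns (s.drop p.toList.length) else 0)).sum := by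
  unfold ways
  conv_lhs => rw [show s.length + 1 = s.length + 1 from rfl]
  simp only [waysF, if_neg hs]
  apply congrArg
  apply List.map_congr_left
  intro p _
  by_cases hc : p.toList ≠ [] ∧ p.toList <+: s
  · simp only [if_pos hc]
    have hlen : p.toList.length ≥ 1 := by
      cases hcl : p.toList with
      | nil => exact absurd hcl hc.1
      | cons a t => simp
    have hs1 : s.length ≥ 1 := by
      cases s with
      | nil => exact absurd rfl hs
      | cons a t => simp
    have hd : (s.drop p.toList.length).length = s.length - p.toList.length := by simp
    exact waysF_stable patterns s.length ((s.drop p.toList.length).length + 1) _ (by omega) (by omega)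
  · rw [if_neg hc, if_neg hc]

lemma foldA (patterns : List String) (fuel : Nat) (doc : String)
    (IH : ∀ d m, d.toList.length < fuel → GoodMemo patterns m →
      (countMatchesA patterns fuel d m).1 = ways patterns d.toList ∧
      GoodMemo patterns (countMatchesA patterns fuel d m).2)
    (hlen : doc.toList.length ≤ fuel) (hne : doc.toList ≠ []) :
    ∀ (ps : List String), (∀ p ∈ ps, p ≠ "") →
      ∀ (acc : Int) (memo : PySem.Dict String Int), GoodMemo patterns memo →
      ∃ M, (ps.foldl (fun (st : Int × PySem.Dict String Int) pattern =>
          if PySem.Str.startswith doc pattern then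
            let remaining := PySem.Str.slice doc (some (PySem.Str.len pattern)) none
            let res := countMatchesA patterns fuel remaining st.2
            (st.1 + res.1, res.2)
          else st) (acc, memo))
        = (acc + (ps.map (fun p => if p.toList ≠ [] ∧ p.toList <+: doc.toList
              then ways patterns (doc.toList.drop p.toList.length) else 0)).sum, M)
        ∧ GoodMemo patterns M := by
  intro ps
  induction ps with
  | nil => intro _ acc memo hm; exact ⟨memo, by simp, hm⟩
  | cons p ps ih =>
    intro hps acc memo hm
    have hpne : p ≠ "" := hps p (List.mem_cons_self ..)
    have hpl : p.toList ≠ [] := toList_ne_nil hpne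
    simp only [List.foldl_cons]
    by_cases hsw : PySem.Str.startswith doc p
    · have hpre : p.toList <+: doc.toList := by
        have := PySem.Str.startswith_eq doc p
        rw [hsw] at this
        exact (PySem.Chars.startswith_iff _ _).mp this.symm
      have hp1 : 1 ≤ p.toList.length := by
        cases h : p.toList with
        | nil => exact absurd h hpl
        | cons a t => simp
      have hrem : (PySem.Str.slice doc (some (PySem.Str.len p)) none).toList
          = doc.toList.drop p.toList.length := by
        rw [PySem.Str.toList_slice, PySem.Chars.slice_eq_listSlice, PySem.Str.len_eq]
        exact PySem.List.slice_from_natCast doc.toList p.toList.length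
      have hlt : (PySem.Str.slice doc (some (PySem.Str.len p)) none).toList.length < fuel := by
        rw [hrem, List.length_drop]
        have hple := List.IsPrefix.length_le hpre
        have hd1 : 1 ≤ doc.toList.length := by
          cases h : doc.toList with
          | nil => exact absurd h hne
          | cons a t => simp
        omega
      obtain ⟨h1, h2⟩ := IH _ memo hlt hm
      simp only [if_pos hsw]
      obtain ⟨M, hM, hMg⟩ := ih (fun q hq => hps q (List.mem_cons_of_mem _ hq))
        (acc + (countMatchesA patterns fuel (PySem.Str.slice doc (some (PySem.Str.len p)) none) memo).1)
        (countMatchesA patterns fuel (PySem.Str.slice doc (some (PySem.Str.len p)) none) memo).2 h2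
      refine ⟨M, ?_, hMg⟩
      rw [hM, h1, hrem]
      have : (if p.toList ≠ [] ∧ p.toList <+: doc.toList
          then ways patterns (doc.toList.drop p.toList.length) else 0)
          = ways patterns (doc.toList.drop p.toList.length) := if_pos ⟨hpl, hpre⟩
      simp only [List.map_cons, List.sum_cons, this]
      ring_nf
    · have hnpre : ¬ p.toList <+: doc.toList := by
        intro hpre
        apply hsw
        have := PySem.Str.startswith_eq doc p
        rw [(PySem.Chars.startswith_iff doc.toList p.toList).mpr hpre] at this
        exact this
      simp only [if_neg hsw]
      obtain ⟨M, hM, hMg⟩ := ih (fun q hq => hps q (List.mem_cons_of_mem _ hq)) acc memo hm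
      refine ⟨M, ?_, hMg⟩
      rw [hM]
      simp only [List.map_cons, List.sum_cons]
      rw [if_neg (fun h : p.toList ≠ [] ∧ p.toList <+: doc.toList => hnpre h.2)]
      ring_nf

lemma countA_correct (patterns : List String) (hp : "" ∉ patterns) :
    ∀ fuel doc memo, doc.toList.length < fuel → GoodMemo patterns memo →
      (countMatchesA patterns fuel doc memo).1 = ways patterns doc.toList ∧
      GoodMemo patterns (countMatchesA patterns fuel doc memo).2 := by
  intro fuel
  induction fuel with
  | zero => intro doc memo h; omega
  | succ fuel ih =>
    intro doc memo hlen hm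
    simp only [countMatchesA]
    cases hget : memo.get? doc with
    | some v => exact ⟨hm _ _ hget, hm⟩
    | none =>
      by_cases hd : doc = ""
      · subst hd
        simp only [reduceIte]
        refine ⟨?_, hm⟩
        show (1 : Int) = ways patterns ("" : String).toList
        simp [ways, waysF]
      · simp only [if_neg hd]
        obtain ⟨M, hM, hMg⟩ := foldA patterns fuel doc ih (by omega) (toList_ne_nil hd) patterns
          (fun q hq => fun e => hp (e ▸ hq)) 0 memo hm
        rw [hM]
        have hsum : (0 : Int) + (patterns.map (fun p => if p.toList ≠ [] ∧ p.toList <+: doc.toList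
              then ways patterns (doc.toList.drop p.toList.length) else 0)).sum
            = ways patterns doc.toList := by
          rw [zero_add, ← ways_eq_sum patterns doc.toList (toList_ne_nil hd)]
        constructor
        · exact hsum
        · intro k v hkv
          rw [PySem.Dict.get?_insert] at hkv
          split at hkv
          · rename_i he
            subst he
            rw [← Option.some_inj.mp hkv, hsum]
          · exact hMg _ _ hkv

lemma ways_nil (patterns : List String) : ways patterns [] = 1 := by simp [ways, waysF]

lemma altStep (patterns : List String) (doc : String) (i : Nat) (hi : i < doc.toList.length) :
    (patterns.foldl
      (fun head p =>
        if p ≠ "" ∧ PySem.Str.slice doc (some (i : Int)) (some ((i : Int) + PySem.Str.len p)) = p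
        then head + PySem.List.pyGetD ((List.tails (doc.toList.drop (i + 1))).map (ways patterns)) (PySem.Str.len p - 1) 0
        else head) (0 : Int))
      = ways patterns (doc.toList.drop i) := by
  have hne : doc.toList.drop i ≠ [] := by
    intro h
    have h0 : (doc.toList.drop i).length = 0 := by rw [h]; rfl
    rw [List.length_drop] at h0
    omega
  rw [PySem.List.foldl_congr_mem _ _
    (fun head p =>
      head + (if p ≠ "" ∧ PySem.Str.slice doc (some (i : Int)) (some ((i : Int) + PySem.Str.len p)) = p
        then PySem.List.pyGetD ((List.tails (doc.toList.drop (i + 1))).map (ways patterns)) (PySem.Str.len p - 1) 0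
        else 0)) _
    (by intro acc p _
        beta_reduce
        by_cases hc : p ≠ "" ∧ PySem.Str.slice doc (some (i : Int)) (some ((i : Int) + PySem.Str.len p)) = p
        · rw [if_pos hc, if_pos hc]
        · rw [if_neg hc, if_neg hc, add_zero])]
  rw [PySem.List.foldl_add, zero_add, ways_eq_sum patterns _ hne]
  apply congrArg
  apply List.map_congr_left
  intro p _
  have hC : (p ≠ "" ∧ PySem.Str.slice doc (some (i : Int)) (some ((i : Int) + PySem.Str.len p)) = p)
      ↔ (p.toList ≠ [] ∧ p.toList <+: doc.toList.drop i) := by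
    constructor
    · rintro ⟨h1, h2⟩
      refine ⟨toList_ne_nil h1, ?_⟩
      rw [List.prefix_iff_eq_take]
      rw [← String.toList_inj, PySem.Str.toList_slice, PySem.Chars.slice_eq_listSlice,
        PySem.Str.len_eq, PySem.List.slice_natCast_add] at h2
      exact h2.symm
    · rintro ⟨h1, h2⟩
      refine ⟨fun he => h1 (by rw [he]; rfl), ?_⟩
      rw [← String.toList_inj, PySem.Str.toList_slice, PySem.Chars.slice_eq_listSlice,
        PySem.Str.len_eq, PySem.List.slice_natCast_add]
      exact ((List.prefix_iff_eq_take).mp h2).symm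
  by_cases hc : p.toList ≠ [] ∧ p.toList <+: doc.toList.drop i
  · rw [if_pos (hC.mpr hc), if_pos hc]
    have hp1 : 1 ≤ p.toList.length := by
      cases h : p.toList with
      | nil => exact absurd h hc.1
      | cons a t => simp
    have hle : p.toList.length ≤ doc.toList.length - i := by
      have := List.IsPrefix.length_le hc.2
      rw [List.length_drop] at this
      exact this
    have hcast : PySem.Str.len p - 1 = ((p.toList.length - 1 : Nat) : Int) := by
      rw [PySem.Str.len_eq]; omega
    rw [hcast, PySem.List.pyGetD_natCast]
    have hidx : p.toList.length - 1 < ((List.tails (doc.toList.drop (i + 1))).map (ways patterns)).length := by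
      rw [List.length_map, List.length_tails, List.length_drop]
      omega
    rw [List.getD_eq_getElem _ _ hidx, List.getElem_map, List.getElem_tails, List.drop_drop,
      List.drop_drop]
    congr 2
    omega
  · rw [if_neg (fun h => hc (hC.mp h)), if_neg hc]

lemma altWs (patterns : List String) (doc : String) :
    ∀ i : Nat, i ≤ doc.toList.length →
    (PySem.List.pyRange ((i : Int) - 1) (-1) (-1)).foldl
      (fun ws j =>
        (patterns.foldl
          (fun head p =>
            if p ≠ "" ∧ PySem.Str.slice doc (some j) (some (j + PySem.Str.len p)) = p
            then head + PySem.List.pyGetD ws (PySem.Str.len p - 1) 0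
            else head) (0 : Int)) :: ws)
      ((List.tails (doc.toList.drop i)).map (ways patterns))
      = (List.tails doc.toList).map (ways patterns) := by
  intro i
  induction i with
  | zero =>
    intro _
    have h : ((0 : Nat) : Int) - 1 = -1 := by norm_num
    rw [h, PySem.List.pyRange_neg_one_eq_nil (le_refl _), List.foldl_nil, List.drop_zero]
  | succ i ih =>
    intro hle
    have hcast : ((i + 1 : Nat) : Int) - 1 = (i : Int) := by push_cast; ring
    have hi : i < doc.toList.length := Nat.lt_of_succ_le hle
    rw [hcast, PySem.List.pyRange_neg_one_cons (show (-1 : Int) < (i : Int) by omega), List.foldl_cons]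
    rw [altStep patterns doc i hi]
    have hrw : ways patterns (doc.toList.drop i) :: (List.tails (doc.toList.drop (i + 1))).map (ways patterns)
        = (List.tails (doc.toList.drop i)).map (ways patterns) := by
      conv_rhs => rw [List.drop_eq_getElem_cons hi]
      rw [List.tails_cons, List.map_cons]
      congr 1
      rw [← List.drop_eq_getElem_cons hi]
    rw [hrw]
    exact ih (le_of_lt hi)

lemma altDoc_eq (patterns : List String) (doc : String) :
    altDoc patterns doc = ways patterns doc.toList := by
  simp only [altDoc]
  have hinit : [(1 : Int)] = (List.tails (doc.toList.drop doc.toList.length)).map (ways patterns) := by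
    rw [List.drop_length]
    simp [ways_nil]
  rw [hinit, altWs patterns doc doc.toList.length (le_refl _)]
  cases h : doc.toList with
  | nil => simp [PySem.List.pyGetD, ways_nil]
  | cons a t =>
    rw [List.tails_cons, List.map_cons]
    simp [PySem.List.pyGetD]

lemma memo_empty_good (patterns : List String) : GoodMemo patterns PySem.Dict.empty := by
  intro k v h; rw [PySem.Dict.get?_empty] at h; cases h

lemma per_doc (patterns : List String) (doc : String) (h : "" ∉ patterns ∨ doc = "") :
    (countMatchesA patterns (doc.toList.length + 1) doc PySem.Dict.empty).1 = altDoc patterns doc := by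
  rw [altDoc_eq]
  rcases h with hp | hd
  · exact (countA_correct patterns hp (doc.toList.length + 1) doc PySem.Dict.empty
      (by omega) (memo_empty_good patterns)).1
  · subst hd
    simp [countMatchesA, PySem.Dict.get?_empty, ways, waysF]

-- ===== VERDICT (by name: the statement is the Claim_ definition above) =====
theorem process_documents_spec : Claim_equal_process_documents := by
  unfold Claim_equal_process_documents
  intro patterns documents _ hpre
  unfold Spec_process_documents process_documents process_documents_alt
  apply PySem.List.foldl_congr_mem
  intro acc doc hdoc
  have h : "" ∉ patterns ∨ doc = "" := by
    rcases hpre with h | h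
    · exact Or.inl h
    · exact Or.inr (h doc hdoc)
  simp only [per_doc patterns doc h]

@[simp] theorem process_documents_raises : Claim_raises_process_documents := by
  unfold Claim_raises_process_documents
  constructor
  · intro patterns documents _ hr hpre
    rcases hr with ⟨hmem, d, hd, hne⟩
    rcases hpre with h | h
    · exact h hmem
    · exact hne (h d hd)
  · exact ⟨by decide, by decide, by decide⟩
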